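-- pv_equiv track=rewrite | github.com/sebastiancrinteadaniel/c2 | app/routes/webrtc.py | _inject_bandwidth
-- ===== SOURCE A (Python) =====
-- def _inject_bandwidth(sdp: str, kbps: int) -> str:
--     """
--     Insert  b=AS:<kbps>  into every video m-section of an SDP string.
--     This hints to the encoder that it can use up to <kbps> kbps - critical
--     for getting decent quality on LAN where bandwidth is not the bottleneck.
--     """
--     lines = sdp.splitlines()
--     patched: list[str] = []
--     in_video = False
--     bw_written = False
--
--     for line in lines:
--         if line.startswith("m=video"):
--             in_video = True
--             bw_written = False
--             patched.append(line)
--             continue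
--         elif line.startswith("m="):
--             in_video = False
--         if in_video and not bw_written and line.startswith("c="):
--             patched.append(line)
--             patched.append(f"b=AS:{kbps}")
--             bw_written = True
--             continue
--
--         patched.append(line)
--
--     return "\r\n".join(patched) + "\r\n"
-- ===== SOURCE B (Python) =====
-- def _inject_bandwidth(sdp: str, kbps: int) -> str:
--     """Partition the SDP into sections at each m= header, patch video
--     sections independently, then rejoin."""
--     lines = sdp.splitlines()
--     sections: list[list[str]] = []
--     cur: list[str] = []
--     for line in lines:
--         if line.startswith("m="):
--             sections.append(cur)
--             cur = [line]
--         else: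
--             cur.append(line)
--     sections.append(cur)
--
--     def patch(sec: list[str]) -> list[str]:
--         if not sec or not sec[0].startswith("m=video"):
--             return sec
--         out: list[str] = []
--         rest = sec
--         while rest:
--             l, rest = rest[0], rest[1:]
--             out.append(l)
--             if l.startswith("c="):
--                 out.append(f"b=AS:{kbps}")
--                 break
--         return out + rest
--
--     patched = [l for sec in sections for l in patch(sec)]
--     return "\r\n".join(patched) + "\r\n"
-- ===== Notes on version B (the rewrite author's own statement) =====
-- stated objective: alternative
-- what changed: Replaces A's single-pass in_video/bw_written flag state machine by a partition of the lines into m=-delimited sections followed by an independent patch of each video section (insert b=AS after its first c= line) and a rejoin.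
import Mathlib
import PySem

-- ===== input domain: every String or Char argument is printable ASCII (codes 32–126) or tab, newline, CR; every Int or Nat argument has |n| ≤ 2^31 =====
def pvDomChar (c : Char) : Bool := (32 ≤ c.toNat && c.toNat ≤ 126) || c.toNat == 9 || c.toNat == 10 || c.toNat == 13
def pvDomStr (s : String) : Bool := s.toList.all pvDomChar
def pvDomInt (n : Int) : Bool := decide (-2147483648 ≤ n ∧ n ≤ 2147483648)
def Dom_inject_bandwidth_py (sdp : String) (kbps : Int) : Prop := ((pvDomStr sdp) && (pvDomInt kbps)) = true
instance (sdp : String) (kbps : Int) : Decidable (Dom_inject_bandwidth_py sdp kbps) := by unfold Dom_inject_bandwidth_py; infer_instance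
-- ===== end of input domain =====

-- B replaces A's in_video/bw_written flag machine by a partition-into-m=-sections
-- pass followed by an independent patch of each video section (objective: alternative).

-- ===== PORT A =====
-- pvSW l p = l.startswith(p) (Python str.startswith, via PySem)
def pvSW (l p : String) : Bool := PySem.Str.startswith l p

-- the for-loop over lines with state (in_video, bw_written), step for step
def pvGoA (kbps : Int) : List String → Bool → Bool → List String
  | [], _, _ => []
  | l :: ls, in_video, bw_written =>
    if pvSW l "m=video" then
      l :: pvGoA kbps ls true false
    else
      let in_video' := if pvSW l "m=" then false else in_video
      if in_video' && !bw_written && pvSW l "c=" then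
        l :: ("b=AS:" ++ PySem.Int.toStr kbps) :: pvGoA kbps ls in_video' true
      else
        l :: pvGoA kbps ls in_video' bw_written

def inject_bandwidth_py (sdp : String) (kbps : Int) : String :=
  PySem.Str.join "\r\n" (pvGoA kbps (PySem.Str.splitlines sdp) false false) ++ "\r\n"

-- ===== PORT B =====
-- the section-building loop body of Source B
def pvSplitStep (st : List (List String) × List String) (l : String) :
    List (List String) × List String :=
  if pvSW l "m=" then (st.1 ++ [st.2], [l]) else (st.1, st.2 ++ [l])

-- Source B's while-loop in patch: walk until the first c= line, insert b=AS after it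
def pvInsC (kbps : Int) : List String → List String
  | [] => []
  | l :: rest =>
    if pvSW l "c=" then l :: ("b=AS:" ++ PySem.Int.toStr kbps) :: rest
    else l :: pvInsC kbps rest

def pvPatch (kbps : Int) (sec : List String) : List String :=
  match sec with
  | [] => []
  | h :: _ => if pvSW h "m=video" then pvInsC kbps sec else sec

def inject_bandwidth_py_alt (sdp : String) (kbps : Int) : String :=
  let lines := PySem.Str.splitlines sdp
  let st := lines.foldl pvSplitStep ([], [])
  PySem.Str.join "\r\n" ((st.1 ++ [st.2]).flatMap (pvPatch kbps)) ++ "\r\n"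

-- ===== PRECONDITION & SPEC =====
def Spec_inject_bandwidth_py (sdp : String) (kbps : Int) (out : String) : Prop := out = inject_bandwidth_py_alt sdp kbps
instance (sdp : String) (kbps : Int) (out : String) : Decidable (Spec_inject_bandwidth_py sdp kbps out) := by unfold Spec_inject_bandwidth_py; infer_instance

-- ===== CLAIM (what is proved, stated in full; the proofs are below) =====
def Claim_equal_inject_bandwidth_py : Prop := ∀ (sdp : String) (kbps : Int), Dom_inject_bandwidth_py sdp kbps → Spec_inject_bandwidth_py sdp kbps (inject_bandwidth_py sdp kbps)

-- ===== LEMMAS AND PROOFS =====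

-- prefix facts
theorem pv_sw_video_m (l : String) (h : pvSW l "m=video" = true) :
    pvSW l "m=" = true := by
  simp only [pvSW, PySem.Str.startswith_eq, PySem.Chars.startswith_iff] at h ⊢
  exact List.IsPrefix.trans (by decide) h

theorem pv_m_not_c (l : String) (h : pvSW l "m=" = true) :
    pvSW l "c=" = false := by
  simp only [pvSW, PySem.Str.startswith_eq, PySem.Chars.startswith_iff] at h ⊢
  rw [Bool.eq_false_iff]
  intro hc
  rw [PySem.Chars.startswith_iff] at hc
  obtain ⟨t, ht⟩ := h
  obtain ⟨u, hu⟩ := hc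
  rw [← hu] at ht
  simp at ht

-- section-free reference function: pvC = outside a video section, pvV bw = inside one
mutual
def pvC (kbps : Int) : List String → List String
  | [] => []
  | l :: ls =>
    if pvSW l "m=video" then l :: pvV kbps false ls
    else l :: pvC kbps ls

def pvV (kbps : Int) (bw : Bool) : List String → List String
  | [] => []
  | l :: ls =>
    if pvSW l "m=video" then l :: pvV kbps false ls
    else if pvSW l "m=" then l :: pvC kbps ls
    else if !bw && pvSW l "c=" then
      l :: ("b=AS:" ++ PySem.Int.toStr kbps) :: pvV kbps true ls
    else l :: pvV kbps bw ls
end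

-- A equals the reference function
theorem pvGoA_eq (kbps : Int) (ls : List String) :
    (∀ bw, pvGoA kbps ls false bw = pvC kbps ls) ∧
    (∀ bw, pvGoA kbps ls true bw = pvV kbps bw ls) := by
  induction ls with
  | nil => simp [pvGoA, pvC, pvV]
  | cons l ls ih =>
    constructor
    · intro bw
      by_cases hv : pvSW l "m=video" = true
      · simp [pvGoA, pvC, hv, ih.2]
      · simp [pvGoA, pvC, hv, ih.1]
    · intro bw
      by_cases hv : pvSW l "m=video" = true
      · simp [pvGoA, pvV, hv, ih.2]
      · by_cases hm : pvSW l "m=" = true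
        · simp [pvGoA, pvV, hv, hm, pv_m_not_c l hm, ih.1]
        · by_cases hc : (!bw && pvSW l "c=") = true
          · simp [pvGoA, pvV, hv, hm, hc, ih.2]
          · simp [pvGoA, pvV, hv, hm, hc, ih.2]

-- B's fold, with the open section made explicit
def pvR (kbps : Int) (cur : List String) (ls : List String) : List String :=
  ((List.foldl pvSplitStep ([], cur) ls).1 ++ [(List.foldl pvSplitStep ([], cur) ls).2]).flatMap
    (pvPatch kbps)

theorem pvFold_shift (ls : List String) : ∀ (secs : List (List String)) (cur : List String),
    List.foldl pvSplitStep (secs, cur) ls =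
      (secs ++ (List.foldl pvSplitStep ([], cur) ls).1, (List.foldl pvSplitStep ([], cur) ls).2) := by
  induction ls with
  | nil => intro secs cur; simp
  | cons l ls ih =>
    intro secs cur
    by_cases hm : pvSW l "m=" = true
    · simp only [List.foldl_cons, pvSplitStep, hm, if_pos]
      rw [ih (secs ++ [cur]) [l], ih ([] ++ [cur]) [l]]
      simp
    · simp only [List.foldl_cons, pvSplitStep, hm, if_neg, Bool.false_eq_true, not_false_iff]
      exact ih secs (cur ++ [l])

theorem pvR_nil (kbps : Int) (cur : List String) : pvR kbps cur [] = pvPatch kbps cur := by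
  simp [pvR]

theorem pvR_cons_m (kbps : Int) (cur : List String) (l : String) (ls : List String)
    (hm : pvSW l "m=" = true) :
    pvR kbps cur (l :: ls) = pvPatch kbps cur ++ pvR kbps [l] ls := by
  simp only [pvR, List.foldl_cons, pvSplitStep, hm, if_pos, List.nil_append]
  rw [pvFold_shift ls [cur] [l]]
  simp

theorem pvR_cons_other (kbps : Int) (cur : List String) (l : String) (ls : List String)
    (hm : pvSW l "m=" = false) :
    pvR kbps cur (l :: ls) = pvR kbps (cur ++ [l]) ls := by
  simp [pvR, pvSplitStep, hm]

-- pvInsC helpers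
def pvNoC (mid : List String) : Bool := mid.all (fun l => !pvSW l "c=")

theorem pvInsC_append_noC (kbps : Int) (mid rest : List String) (h : pvNoC mid = true) :
    pvInsC kbps (mid ++ rest) = mid ++ pvInsC kbps rest := by
  induction mid with
  | nil => simp
  | cons l t ih =>
    simp only [pvNoC, List.all_cons, Bool.and_eq_true, Bool.not_eq_true'] at h
    simp [pvInsC, h.1, ih (by simp [pvNoC, h.2])]

theorem pvInsC_append_hasC (kbps : Int) (mid rest : List String) (h : pvNoC mid = false) :
    pvInsC kbps (mid ++ rest) = pvInsC kbps mid ++ rest := by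
  induction mid with
  | nil => simp [pvNoC] at h
  | cons l t ih =>
    by_cases hc : pvSW l "c=" = true
    · simp [pvInsC, hc]
    · simp only [pvNoC, List.all_cons, Bool.not_eq_true'] at h
      simp only [Bool.not_eq_true] at hc
      simp only [hc, Bool.not_false, Bool.true_and] at h
      simp [pvInsC, hc, ih h]

theorem pvInsC_noC (kbps : Int) (mid : List String) (h : pvNoC mid = true) :
    pvInsC kbps mid = mid := by
  have := pvInsC_append_noC kbps mid [] h
  simpa [pvInsC] using this

-- a section whose first line is not an m=video header is left unchanged by patch
def pvOkN (cur : List String) : Prop :=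
  ∀ h t, cur = h :: t → pvSW h "m=video" = false

theorem pvPatch_okN (kbps : Int) (cur : List String) (h : pvOkN cur) :
    pvPatch kbps cur = cur := by
  cases cur with
  | nil => rfl
  | cons a t => simp [pvPatch, h a t rfl]

theorem pvPatch_video (kbps : Int) (l0 : String) (mid : List String)
    (hv : pvSW l0 "m=video" = true) :
    pvPatch kbps (l0 :: mid) = l0 :: pvInsC kbps mid := by
  have hc : pvSW l0 "c=" = false := pv_m_not_c l0 (pv_sw_video_m l0 hv)
  simp [pvPatch, hv, pvInsC, hc]

-- the main joint invariant: B's deferred per-section patching tracks the reference function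
theorem pvMain (kbps : Int) (ls : List String) :
    (∀ cur, pvOkN cur → pvR kbps cur ls = cur ++ pvC kbps ls) ∧
    (∀ l0 mid, pvSW l0 "m=video" = true →
      (pvNoC mid = true → pvR kbps (l0 :: mid) ls = l0 :: (mid ++ pvV kbps false ls)) ∧
      (pvNoC mid = false → pvR kbps (l0 :: mid) ls = l0 :: (pvInsC kbps mid ++ pvV kbps true ls))) := by
  induction ls with
  | nil =>
    constructor
    · intro cur hok
      rw [pvR_nil, pvPatch_okN kbps cur hok]
      simp [pvC]
    · intro l0 mid hv
      constructor
      · intro hno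
        rw [pvR_nil, pvPatch_video kbps l0 mid hv, pvInsC_noC kbps mid hno]
        simp [pvV]
      · intro _
        rw [pvR_nil, pvPatch_video kbps l0 mid hv]
        simp [pvV]
  | cons l ls ih =>
    have hRl : pvSW l "m=video" = true →
        pvR kbps [l] ls = l :: pvV kbps false ls := by
      intro hv
      have := (ih.2 l [] hv).1 (by simp [pvNoC])
      simpa using this
    have hRlC : pvSW l "m=video" = false →
        pvR kbps [l] ls = l :: pvC kbps ls := by
      intro hv
      have := ih.1 [l] (by intro h t he; cases he; exact hv)
      simpa using this
    constructor
    · intro cur hok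
      by_cases hm : pvSW l "m=" = true
      · rw [pvR_cons_m kbps cur l ls hm, pvPatch_okN kbps cur hok]
        by_cases hv : pvSW l "m=video" = true
        · rw [hRl hv]; simp [pvC, hv]
        · rw [hRlC (by simpa using hv)]; simp [pvC, hv]
      · have hv : pvSW l "m=video" = false := by
          rcases Bool.eq_false_or_eq_true (pvSW l "m=video") with h | h
          · exact absurd (pv_sw_video_m l h) (by simpa using hm)
          · exact h
        rw [pvR_cons_other kbps cur l ls (by simpa using hm)]
        rw [ih.1 (cur ++ [l]) ?_]
        · simp [pvC, hv]
        · intro h t he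
          cases cur with
          | nil => simp at he; cases he.1; exact hv
          | cons a u =>
            simp at he
            rw [← he.1]
            exact hok a u rfl
    · intro l0 mid hv0
      have hvm0 : pvSW l0 "m=" = true := pv_sw_video_m l0 hv0
      by_cases hm : pvSW l "m=" = true
      · -- l starts a new section
        rw  [pvR_cons_m kbps (l0 :: mid) l ls hm, pvPatch_video kbps l0 mid hv0]
        by_cases hv : pvSW l "m=video" = true
        · rw [hRl hv]
          constructor
          · intro hno
            rw [pvInsC_noC kbps mid hno]
            simp [pvV, hv]
          · intro _
            simp [pvV, hv]
        · rw [hRlC (by simpa using hv)]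
          constructor
          · intro hno
            rw [pvInsC_noC kbps mid hno]
            simp [pvV, hv, hm]
          · intro _
            simp [pvV, hv, hm]
      · -- l continues the current video section
        have hv : pvSW l "m=video" = false := by
          rcases Bool.eq_false_or_eq_true (pvSW l "m=video") with h | h
          · exact absurd (pv_sw_video_m l h) (by simpa using hm)
          · exact h
        have hmf : pvSW l "m=" = false := by simpa using hm
        rw [pvR_cons_other kbps (l0 :: mid) l ls hmf]
        have hstep : (l0 :: mid) ++ [l] = l0 :: (mid ++ [l]) := by simp
        rw [hstep]
        constructor
        · intro hno
          by_cases hc : pvSW l "c=" = true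
          · -- first c= of the section: b=AS goes in right here
            have hno' : pvNoC (mid ++ [l]) = false := by
              simp [pvNoC, hc]
            rw [((ih.2 l0 (mid ++ [l]) hv0).2 hno')]
            rw [pvInsC_append_noC kbps mid [l] hno]
            simp [pvV, hv, hmf, hc, pvInsC]
          · have hcf : pvSW l "c=" = false := by simpa using hc
            have hno' : pvNoC (mid ++ [l]) = true := by
              simp [pvNoC, hcf]
              simpa [pvNoC] using hno
            rw [((ih.2 l0 (mid ++ [l]) hv0).1 hno')]
            simp [pvV, hv, hmf, hcf]
        · intro hhas
          have hmid := hhas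
          simp only [pvNoC] at hmid
          have hhas' : pvNoC (mid ++ [l]) = false := by
            simp [pvNoC, hmid]
          rw [((ih.2 l0 (mid ++ [l]) hv0).2 hhas')]
          rw [pvInsC_append_hasC kbps mid [l] hhas]
          simp [pvV, hv, hmf]

-- ===== VERDICT (by name: the statement is the Claim_ definition above) =====
theorem inject_bandwidth_py_spec : Claim_equal_inject_bandwidth_py := by
  intro sdp kbps _
  unfold Spec_inject_bandwidth_py inject_bandwidth_py inject_bandwidth_py_alt
  have hlines : pvGoA kbps (PySem.Str.splitlines sdp) false false =
      pvC kbps (PySem.Str.splitlines sdp) :=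
    (pvGoA_eq kbps (PySem.Str.splitlines sdp)).1 false
  have hB : pvR kbps [] (PySem.Str.splitlines sdp) = pvC kbps (PySem.Str.splitlines sdp) := by
    have := (pvMain kbps (PySem.Str.splitlines sdp)).1 [] (by intro h t he; cases he)
    simpa using this
  simp only [pvR] at hB
  rw [hlines, ← hB]
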